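-- pv_equiv track=rewrite | github.com/loregrc/Computational-intelligence | QUIXO_TEST/helping_functions.py | find_max_sequence
-- ===== SOURCE A (Python) =====
-- def find_max_sequence(player, board, board_size=5):
--
--     max_sequence_length = 0
--
--     # Check rows for pieces
--     for i in range(board_size):
--         row_count = sum(1 for j in range(board_size) if board[i][j] == player)
--         max_sequence_length = max(max_sequence_length, row_count)
--
--     # Check columns for pieces
--     for j in range(board_size):
--         col_count = sum(1 for i in range(board_size) if board[i][j] == player)
--         max_sequence_length = max(max_sequence_length, col_count)
--
--     # Check main diagonal \
--     diag_count1 = sum(1 for i in range(board_size) if board[i][i] == player)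
--
--     # Check secondary diagonal /
--     diag_count2 = sum(1 for i in range(board_size) if board[i][board_size - 1 - i] == player)
--
--     max_sequence_length = max(max_sequence_length, diag_count1, diag_count2)
--
--     return max_sequence_length
-- ===== SOURCE B (Python) =====
-- def find_max_sequence(player, board, board_size=5):
--     # One nested sweep building per-row/per-column count tables and two
--     # diagonal counters, then a single max over the table.
--     row_counts = [0] * max(board_size, 0)
--     col_counts = [0] * max(board_size, 0)
--     diag1 = 0
--     diag2 = 0
--     for i in range(board_size):
--         for j in range(board_size):
--             if board[i][j] == player:
--                 row_counts[i] += 1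
--                 col_counts[j] += 1
--                 if i == j:
--                     diag1 += 1
--                 if i + j == board_size - 1:
--                     diag2 += 1
--     return max(0, *row_counts, *col_counts, diag1, diag2)
-- ===== Notes on version B (the rewrite author's own statement) =====
-- stated objective: alternative
-- what changed: A makes four separate line scans (one 0/1-sum per row, per column and per diagonal) and maxes as it goes; B makes a single nested sweep over (i,j) that fills per-row and per-column count tables plus two diagonal counters, then takes one max over the whole table.
import Mathlib
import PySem

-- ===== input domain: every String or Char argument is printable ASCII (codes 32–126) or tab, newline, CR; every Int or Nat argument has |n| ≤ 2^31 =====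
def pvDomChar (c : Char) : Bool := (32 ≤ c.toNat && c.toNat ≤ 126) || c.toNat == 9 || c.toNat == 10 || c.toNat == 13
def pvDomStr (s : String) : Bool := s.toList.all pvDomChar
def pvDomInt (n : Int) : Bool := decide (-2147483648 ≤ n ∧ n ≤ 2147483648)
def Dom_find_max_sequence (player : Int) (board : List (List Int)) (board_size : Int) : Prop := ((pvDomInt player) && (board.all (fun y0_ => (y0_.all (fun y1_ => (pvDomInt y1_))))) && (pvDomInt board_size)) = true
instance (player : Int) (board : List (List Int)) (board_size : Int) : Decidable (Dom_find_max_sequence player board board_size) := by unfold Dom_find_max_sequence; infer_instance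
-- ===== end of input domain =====

-- B replaces A's four separate line scans by one nested sweep that fills per-row and
-- per-column count tables plus two diagonal counters, then takes one max over the table
-- (objective: alternative decomposition, same asymptotic cost).


-- board[i][j] as Python evaluates it (none = IndexError; Pre_ keeps it in range)
def pvCell (board : List (List Int)) (i j : Int) : Option Int :=
  (PySem.List.pyGet? board i).bind (fun r => PySem.List.pyGet? r j)

-- ===== PORT A =====
-- four scans: per-row 0/1 sums, per-column 0/1 sums, the two diagonal 0/1 sums
def find_max_sequence (player : Int) (board : List (List Int)) (board_size : Int) : Int :=
  let rng := PySem.List.pyRange 0 board_size 1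
  let m1 := rng.foldl (fun m i =>
    max m ((rng.map (fun j => if pvCell board i j == some player then (1:Int) else 0)).sum)) 0
  let m2 := rng.foldl (fun m j =>
    max m ((rng.map (fun i => if pvCell board i j == some player then (1:Int) else 0)).sum)) m1
  let d1 := (rng.map (fun i => if pvCell board i i == some player then (1:Int) else 0)).sum
  let d2 := (rng.map (fun i => if pvCell board i (board_size - 1 - i) == some player then (1:Int) else 0)).sum
  max (max m2 d1) d2

-- ===== PORT B =====
-- one sweep step: on a hit bump row_counts[i], col_counts[j] and the diagonal counters
def pvStep (player : Int) (board : List (List Int)) (board_size : Int)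
    (st : List Int × List Int × Int × Int) (i j : Int) : List Int × List Int × Int × Int :=
  if pvCell board i j == some player then
    (st.1.set i.toNat (st.1.getD i.toNat 0 + 1),
     st.2.1.set j.toNat (st.2.1.getD j.toNat 0 + 1),
     st.2.2.1 + (if i == j then (1:Int) else 0),
     st.2.2.2 + (if i + j == board_size - 1 then (1:Int) else 0))
  else st

def find_max_sequence_alt (player : Int) (board : List (List Int)) (board_size : Int) : Int :=
  let n := (max board_size 0).toNat
  let rng := PySem.List.pyRange 0 board_size 1
  let st := rng.foldl
    (fun st i => rng.foldl (fun st j => pvStep player board board_size st i j) st)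
    (List.replicate n 0, List.replicate n 0, 0, 0)
  ((st.1 ++ st.2.1) ++ [st.2.2.1, st.2.2.2]).foldl max 0

-- ===== PRECONDITION & SPEC =====
-- Pre_: exactly the inputs where Python A returns (A raises IndexError when some
-- board[i] or board[i][j] with 0 ≤ i,j < board_size is missing).
def Pre_find_max_sequence (player : Int) (board : List (List Int)) (board_size : Int) : Prop :=
  board_size.toNat ≤ board.length ∧
    ∀ row ∈ board.take board_size.toNat, board_size.toNat ≤ row.length
instance (player : Int) (board : List (List Int)) (board_size : Int) :
    Decidable (Pre_find_max_sequence player board board_size) := by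
  unfold Pre_find_max_sequence; infer_instance
def pvWitness_find_max_sequence : Int × List (List Int) × Int := (1, [[1, 0], [0, 1]], 2)

def Spec_find_max_sequence (player : Int) (board : List (List Int)) (board_size : Int) (out : Int) : Prop := out = find_max_sequence_alt player board board_size
instance (player : Int) (board : List (List Int)) (board_size : Int) (out : Int) : Decidable (Spec_find_max_sequence player board board_size out) := by unfold Spec_find_max_sequence; infer_instance

-- ===== CLAIM (what is proved, stated in full; the proofs are below) =====
def Claim_equal_find_max_sequence : Prop := ∀ (player : Int) (board : List (List Int)) (board_size : Int), Dom_find_max_sequence player board board_size → Pre_find_max_sequence player board board_size → Spec_find_max_sequence player board board_size (find_max_sequence player board board_size)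

-- ===== LEMMAS AND PROOFS =====

theorem pv_getD_set {α} (l : List α) (i k : Nat) (a d : α) :
    (l.set i a).getD k d = if i = k ∧ k < l.length then a else l.getD k d := by
  simp only [List.getD, List.getElem?_set]
  split_ifs <;> simp_all

theorem pv_countP_flatMap {α β} (p : β → Bool) (l : List α) (f : α → List β) :
    (l.flatMap f).countP p = (l.map (fun a => (f a).countP p)).sum := by
  induction l with
  | nil => simp
  | cons x xs ih => simp [List.countP_append, ih]

theorem pv_sum_ite_range (n k c : Nat) (h : k < n) :
    ((List.range n).map (fun m => if m = k then c else 0)).sum = c := by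
  induction n with
  | zero => omega
  | succ m ih =>
    rw [List.range_succ, List.map_append, List.sum_append]
    rcases Nat.lt_or_ge k m with h' | h'
    · simp [ih h', Nat.ne_of_gt h']
    · have hk : k = m := by omega
      subst hk
      have h0 : ((List.range k).map (fun x => if x = k then c else 0)).sum = 0 := by
        apply List.sum_eq_zero
        intro x hx
        simp only [List.mem_map, List.mem_range] at hx
        obtain ⟨y, hy, rfl⟩ := hx
        have : y ≠ k := by omega
        simp [this]
      simp [h0]

-- the sweep characterised componentwise over an arbitrary list of in-range index pairs
theorem pv_sweep_char (player board_size : Int) (board : List (List Int)) (n : Nat)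
    (ps : List (Int × Int)) (st : List Int × List Int × Int × Int)
    (h1 : st.1.length = n) (h2 : st.2.1.length = n)
    (hps : ∀ p ∈ ps, 0 ≤ p.1 ∧ p.1.toNat < n ∧ 0 ≤ p.2 ∧ p.2.toNat < n) :
    (ps.foldl (fun st p => pvStep player board board_size st p.1 p.2) st).1.length = n ∧
    (ps.foldl (fun st p => pvStep player board board_size st p.1 p.2) st).2.1.length = n ∧
    (∀ k, k < n →
      (ps.foldl (fun st p => pvStep player board board_size st p.1 p.2) st).1.getD k 0
        = st.1.getD k 0 + (ps.countP (fun p => p.1.toNat == k && (pvCell board p.1 p.2 == some player)) : Int)) ∧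
    (∀ k, k < n →
      (ps.foldl (fun st p => pvStep player board board_size st p.1 p.2) st).2.1.getD k 0
        = st.2.1.getD k 0 + (ps.countP (fun p => p.2.toNat == k && (pvCell board p.1 p.2 == some player)) : Int)) ∧
    (ps.foldl (fun st p => pvStep player board board_size st p.1 p.2) st).2.2.1
      = st.2.2.1 + (ps.countP (fun p => (pvCell board p.1 p.2 == some player) && p.1 == p.2) : Int) ∧
    (ps.foldl (fun st p => pvStep player board board_size st p.1 p.2) st).2.2.2
      = st.2.2.2 + (ps.countP (fun p => (pvCell board p.1 p.2 == some player) && p.1 + p.2 == board_size - 1) : Int) := by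
  induction ps generalizing st with
  | nil => simp [h1, h2]
  | cons p ps ih =>
    obtain ⟨hp1, hp1n, hp2, hp2n⟩ := hps p (List.mem_cons_self ..)
    have hps' : ∀ q ∈ ps, 0 ≤ q.1 ∧ q.1.toNat < n ∧ 0 ≤ q.2 ∧ q.2.toNat < n :=
      fun q hq => hps q (List.mem_cons_of_mem _ hq)
    simp only [List.foldl_cons]
    by_cases hh : pvCell board p.1 p.2 = some player
    · have hstep : pvStep player board board_size st p.1 p.2 =
          (st.1.set p.1.toNat (st.1.getD p.1.toNat 0 + 1),
           st.2.1.set p.2.toNat (st.2.1.getD p.2.toNat 0 + 1),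
           st.2.2.1 + (if p.1 == p.2 then (1:Int) else 0),
           st.2.2.2 + (if p.1 + p.2 == board_size - 1 then (1:Int) else 0)) := by
        simp [pvStep, hh]
      rw [hstep]
      obtain ⟨l1, l2, r1, r2, s1, s2⟩ := ih
        (st := (st.1.set p.1.toNat (st.1.getD p.1.toNat 0 + 1),
                st.2.1.set p.2.toNat (st.2.1.getD p.2.toNat 0 + 1),
                st.2.2.1 + (if p.1 == p.2 then (1:Int) else 0),
                st.2.2.2 + (if p.1 + p.2 == board_size - 1 then (1:Int) else 0)))
        (by simp [h1]) (by simp [h2]) hps'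
      refine ⟨l1, l2, ?_, ?_, ?_, ?_⟩
      · intro k hk
        rw [r1 k hk]
        simp only [pv_getD_set, List.countP_cons]
        by_cases hik : p.1.toNat = k
        · simp only [hik, h1, hk, and_self, if_true, hh, BEq.rfl, Bool.and_true]
          push_cast
          ring
        · simp [hik, hh]
      · intro k hk
        rw [r2 k hk]
        simp only [pv_getD_set, List.countP_cons]
        by_cases hjk : p.2.toNat = k
        · simp only [hjk, h2, hk, and_self, if_true, hh, BEq.rfl, Bool.and_true]
          push_cast
          ring
        · simp [hjk, hh]
      · rw [s1, List.countP_cons]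
        simp only [hh, BEq.rfl, Bool.true_and]
        by_cases he : p.1 = p.2 <;> simp [he] <;> omega
      · rw [s2, List.countP_cons]
        simp only [hh, BEq.rfl, Bool.true_and]
        by_cases he : p.1 + p.2 = board_size - 1 <;> simp [he] <;> omega
    · have hstep : pvStep player board board_size st p.1 p.2 = st := by
        simp [pvStep, hh]
      rw [hstep]
      obtain ⟨l1, l2, r1, r2, s1, s2⟩ := ih (st := st) h1 h2 hps'
      refine ⟨l1, l2, ?_, ?_, ?_, ?_⟩ <;>
        simp_all

-- the list of all (i, j) index pairs the sweep visits
def pvPairs (n : Nat) : List (Int × Int) :=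
  ((List.range n).map (fun (m : Nat) => (m : Int))).flatMap
    (fun i => ((List.range n).map (fun (m : Nat) => (m : Int))).map (fun j => (i, j)))

theorem pv_pairs_mem (n : Nat) : ∀ p ∈ pvPairs n, 0 ≤ p.1 ∧ p.1.toNat < n ∧ 0 ≤ p.2 ∧ p.2.toNat < n := by
  intro p hp
  unfold pvPairs at hp
  simp only [List.mem_flatMap, List.mem_map, List.mem_range] at hp
  obtain ⟨i, ⟨mi, hmi, rfl⟩, j, ⟨mj, hmj, rfl⟩, rfl⟩ := hp
  simp only [Int.toNat_natCast]
  omega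

theorem pv_countP_range_eq (n k : Nat) (q : Nat → Bool) (h : k < n) :
    (List.range n).countP (fun m => (m == k) && q m) = if q k then 1 else 0 := by
  induction n with
  | zero => omega
  | succ m ih =>
    rw [List.range_succ, List.countP_append]
    rcases Nat.lt_or_ge k m with h' | h'
    · have h1 : (List.countP (fun m => (m == k) && q m) [m]) = 0 := by
        simp [Nat.ne_of_gt h']
      rw [ih h', h1]
      simp
    · have hk : k = m := by omega
      subst hk
      have h0 : (List.range k).countP (fun m => (m == k) && q m) = 0 := by
        rw [List.countP_eq_zero]
        intro x hx
        simp only [List.mem_range] at hx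
        simp [Nat.ne_of_lt hx]
      rw [h0]
      simp [List.countP_cons]

theorem pv_count_row (hit : Int → Int → Bool) (n k : Nat) (hk : k < n) :
    (pvPairs n).countP (fun p => p.1.toNat == k && hit p.1 p.2)
      = ((List.range n).map (fun (m : Nat) => (m : Int))).countP (fun j => hit ↑k j) := by
  unfold pvPairs
  rw [pv_countP_flatMap, List.map_map, List.countP_map]
  trans ((List.range n).map (fun m => if m = k then (List.range n).countP (fun (mj : Nat) => hit ↑k ↑mj) else 0)).sum
  · apply congrArg List.sum
    apply List.map_congr_left
    intro m hm
    simp only [Function.comp_def, List.countP_map, Int.toNat_natCast]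
    by_cases hmk : m = k
    · subst hmk; simp
    · simp [hmk]
  · rw [pv_sum_ite_range _ _ _ hk]
    simp [Function.comp_def]

theorem pv_count_col (hit : Int → Int → Bool) (n k : Nat) (hk : k < n) :
    (pvPairs n).countP (fun p => p.2.toNat == k && hit p.1 p.2)
      = ((List.range n).map (fun (m : Nat) => (m : Int))).countP (fun i => hit i ↑k) := by
  unfold pvPairs
  rw [pv_countP_flatMap, List.map_map, List.countP_map]
  trans ((List.range n).map (fun (m : Nat) => if hit ↑m ↑k then 1 else 0)).sum
  · apply congrArg List.sum
    apply List.map_congr_left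
    intro m hm
    simp only [Function.comp_def, List.countP_map, Int.toNat_natCast]
    exact pv_countP_range_eq n k (fun mj => hit ↑m ↑mj) hk
  · rw [PySem.List.sum_map_ite_one_zero_nat]
    simp [Function.comp_def]

theorem pv_count_diag1 (hit : Int → Int → Bool) (n : Nat) :
    (pvPairs n).countP (fun p => hit p.1 p.2 && p.1 == p.2)
      = ((List.range n).map (fun (m : Nat) => (m : Int))).countP (fun i => hit i i) := by
  unfold pvPairs
  rw [pv_countP_flatMap, List.map_map, List.countP_map]
  trans ((List.range n).map (fun (m : Nat) => if hit ↑m ↑m then 1 else 0)).sum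
  · apply congrArg List.sum
    apply List.map_congr_left
    intro m hm
    simp only [Function.comp_def, List.countP_map]
    have hco : ∀ x ∈ List.range n,
        (hit ↑m ↑x && ((↑m : Int) == ↑x)) = ((x == m) && hit ↑m ↑x) := by
      intro x _
      by_cases hxm : x = m
      · subst hxm; simp
      · have h1 : ((↑m : Int) == ↑x) = false := by
          simp only [beq_eq_false_iff_ne, ne_eq, Int.natCast_inj]
          omega
        have h2 : (x == m) = false := by simp [hxm]
        simp [h1, h2]
    rw [List.countP_congr (fun x hx => by rw [hco x hx])]
    exact pv_countP_range_eq n m (fun x => hit ↑m ↑x) (List.mem_range.mp hm)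
  · rw [PySem.List.sum_map_ite_one_zero_nat]
    simp [Function.comp_def]

theorem pv_count_diag2 (hit : Int → Int → Bool) (n : Nat) :
    (pvPairs n).countP (fun p => hit p.1 p.2 && p.1 + p.2 == (n : Int) - 1)
      = ((List.range n).map (fun (m : Nat) => (m : Int))).countP (fun i => hit i ((n : Int) - 1 - i)) := by
  unfold pvPairs
  rw [pv_countP_flatMap, List.map_map, List.countP_map]
  trans ((List.range n).map (fun (m : Nat) => if hit ↑m ((n : Int) - 1 - ↑m) then 1 else 0)).sum
  · apply congrArg List.sum
    apply List.map_congr_left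
    intro m hm
    have hmn : m < n := List.mem_range.mp hm
    simp only [Function.comp_def, List.countP_map]
    have hco : ∀ x ∈ List.range n,
        (hit ↑m ↑x && ((↑m + ↑x : Int) == (n : Int) - 1)) = ((x == n - 1 - m) && hit ↑m ↑x) := by
      intro x _
      by_cases hx2 : x = n - 1 - m
      · subst hx2
        have h1 : ((↑m + ↑(n - 1 - m) : Int) == (n : Int) - 1) = true := by
          simp only [beq_iff_eq]
          omega
        simp [h1]
      · have h1 : ((↑m + ↑x : Int) == (n : Int) - 1) = false := by
          simp only [beq_eq_false_iff_ne, ne_eq]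
          omega
        have h2 : (x == n - 1 - m) = false := by simp [hx2]
        simp [h1, h2]
    rw [List.countP_congr (fun x hx => by rw [hco x hx])]
    rw [pv_countP_range_eq n (n - 1 - m) (fun x => hit ↑m ↑x) (by omega)]
    have hcast : ((n - 1 - m : Nat) : Int) = (n : Int) - 1 - ↑m := by omega
    rw [hcast]
  · rw [PySem.List.sum_map_ite_one_zero_nat]
    apply List.countP_congr
    intro x hx
    simp

theorem find_max_sequence_spec : Claim_equal_find_max_sequence := by
  intro player board bs _hdom _hpre
  unfold Spec_find_max_sequence find_max_sequence find_max_sequence_alt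
  rcases (by omega : bs ≤ 0 ∨ 0 < bs) with hbs | hbs
  · rw [PySem.List.pyRange_one_eq_nil hbs]
    have hm0 : (max bs 0).toNat = 0 := by omega
    simp [hm0]
  · obtain ⟨n, rfl⟩ : ∃ n : Nat, bs = (n : Int) := ⟨bs.toNat, by omega⟩
    have hn : 0 < n := by omega
    rw [PySem.List.pyRange_zero_nat n]
    have hmax : (max ((n : Int)) 0).toNat = n := by omega
    rw [hmax]
    have hc :
        ((List.range n).map (fun (m : Nat) => (m : Int))).foldl
          (fun st i => ((List.range n).map (fun (m : Nat) => (m : Int))).foldl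
            (fun st j => pvStep player board ↑n st i j) st)
          (List.replicate n (0:Int), List.replicate n (0:Int), (0:Int), (0:Int))
        = (pvPairs n).foldl (fun st p => pvStep player board ↑n st p.1 p.2)
          (List.replicate n (0:Int), List.replicate n (0:Int), (0:Int), (0:Int)) := by
      unfold pvPairs
      rw [List.foldl_flatMap]
      simp only [List.foldl_map]
    dsimp only
    rw [hc]
    obtain ⟨l1, l2, r1, r2, s1, s2⟩ :=
      pv_sweep_char player (↑n) board n (pvPairs n)
        (List.replicate n (0:Int), List.replicate n (0:Int), (0:Int), (0:Int))
        (by simp) (by simp) (pv_pairs_mem n)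
    have hit_row : ∀ k : Nat, k < n →
        (pvPairs n).countP (fun p => p.1.toNat == k && (pvCell board p.1 p.2 == some player))
          = ((List.range n).map (fun (m : Nat) => (m : Int))).countP
              (fun j => pvCell board ↑k j == some player) := fun k hk =>
      pv_count_row (fun a b => pvCell board a b == some player) n k hk
    have hit_col : ∀ k : Nat, k < n →
        (pvPairs n).countP (fun p => p.2.toNat == k && (pvCell board p.1 p.2 == some player))
          = ((List.range n).map (fun (m : Nat) => (m : Int))).countP
              (fun i => pvCell board i ↑k == some player) := fun k hk =>
      pv_count_col (fun a b => pvCell board a b == some player) n k hk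
    have hd1 : (pvPairs n).countP (fun p => (pvCell board p.1 p.2 == some player) && p.1 == p.2)
          = ((List.range n).map (fun (m : Nat) => (m : Int))).countP
              (fun i => pvCell board i i == some player) :=
      pv_count_diag1 (fun a b => pvCell board a b == some player) n
    have hd2 : (pvPairs n).countP
          (fun p => (pvCell board p.1 p.2 == some player) && p.1 + p.2 == (n : Int) - 1)
          = ((List.range n).map (fun (m : Nat) => (m : Int))).countP
              (fun i => pvCell board i ((n : Int) - 1 - i) == some player) :=
      pv_count_diag2 (fun a b => pvCell board a b == some player) n
    have hrc : (List.foldl (fun st p => pvStep player board (↑n) st p.1 p.2)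
          (List.replicate n 0, List.replicate n 0, 0, 0) (pvPairs n)).1
        = (List.range n).map (fun (k : Nat) =>
            ((((List.range n).map (fun (m : Nat) => (m : Int))).countP
              (fun j => pvCell board ↑k j == some player) : Nat) : Int)) := by
      apply List.ext_getElem (by rw [l1]; simp)
      intro i h1 h2
      have hin : i < n := by rw [l1] at h1; exact h1
      rw [← List.getD_eq_getElem _ 0 h1, r1 i hin, hit_row i hin]
      simp
    have hcc : (List.foldl (fun st p => pvStep player board (↑n) st p.1 p.2)
          (List.replicate n 0, List.replicate n 0, 0, 0) (pvPairs n)).2.1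
        = (List.range n).map (fun (k : Nat) =>
            ((((List.range n).map (fun (m : Nat) => (m : Int))).countP
              (fun i => pvCell board i ↑k == some player) : Nat) : Int)) := by
      apply List.ext_getElem (by rw [l2]; simp)
      intro i h1 h2
      have hin : i < n := by rw [l2] at h1; exact h1
      rw [← List.getD_eq_getElem _ 0 h1, r2 i hin, hit_col i hin]
      simp
    rw [hrc, hcc, s1, s2, hd1, hd2]
    simp only [List.foldl_append, List.foldl_map, List.foldl_cons, List.foldl_nil,
      PySem.List.sum_map_ite_one_zero]
    simp
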